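-- pv_equiv track=rewrite | github.com/codefuse-ai/RepoFuse | code_knowledge_graph/dependency_graph/utils/text.py | slice_text_around
-- ===== SOURCE A (Python) =====
-- def slice_text_around(
--     text: str, start_line: int, start_column: int, end_line: int, end_column: int
-- ) -> tuple[str, str, str]:
--     """
--     Slice the text around the specified portion of the text.
--     :param text: The text to slice
--     :param start_line: The line number of the start of the desired portion of the text (1-based index)
--     :param start_column: The column number of the start of the desired portion of the text (1-based index)
--     :param end_line: The line number of the end of the desired portion of the text (1-based index)
--     :param end_column: The column number of the end of the desired portion of the text (1-based index)
--     :returns The text before the desired portion, the desired portion, and the text after the desired portion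
--     """
--     lines = text.splitlines()
--     start_index = (
--         sum(len(lines[i]) + 1 for i in range(start_line - 1)) + start_column - 1
--     )
--     end_index = sum(len(lines[i]) + 1 for i in range(end_line - 1)) + end_column - 1
--     return text[:start_index], text[start_index:end_index], text[end_index:]
-- ===== SOURCE B (Python) =====
-- def slice_text_around(
--     text: str, start_line: int, start_column: int, end_line: int, end_column: int
-- ) -> tuple[str, str, str]:
--     lines = text.splitlines()
--     offsets = [0]
--     for line in lines:
--         offsets.append(offsets[-1] + len(line) + 1)
--     start_index = offsets[max(start_line - 1, 0)] + start_column - 1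
--     end_index = offsets[max(end_line - 1, 0)] + end_column - 1
--     return text[:start_index], text[start_index:end_index], text[end_index:]
-- ===== Notes on version B (the rewrite author's own statement) =====
-- stated objective: faster
-- what changed: Replaces the two independent per-call summation loops over line lengths by a single prefix-offset table built once, so each index becomes an O(1) table lookup.
import Mathlib
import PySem

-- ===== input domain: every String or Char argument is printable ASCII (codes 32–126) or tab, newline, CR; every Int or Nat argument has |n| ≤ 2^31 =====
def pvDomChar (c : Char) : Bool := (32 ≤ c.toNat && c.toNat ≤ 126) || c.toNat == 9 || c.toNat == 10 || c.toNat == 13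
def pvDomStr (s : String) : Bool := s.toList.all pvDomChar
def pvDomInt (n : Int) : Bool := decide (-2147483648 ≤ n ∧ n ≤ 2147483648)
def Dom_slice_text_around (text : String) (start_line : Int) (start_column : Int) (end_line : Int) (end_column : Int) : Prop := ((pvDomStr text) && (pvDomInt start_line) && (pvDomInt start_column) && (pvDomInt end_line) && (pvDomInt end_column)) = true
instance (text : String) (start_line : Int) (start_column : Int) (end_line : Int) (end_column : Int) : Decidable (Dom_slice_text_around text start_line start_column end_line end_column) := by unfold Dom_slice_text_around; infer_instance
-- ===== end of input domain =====

-- B builds one prefix-offset table over the splitlines result and turns each of A's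
-- per-index summation loops into a single table lookup; return values are identical on Pre_.

-- ===== PORT A =====
def slice_text_around (text : String) (start_line : Int) (start_column : Int) (end_line : Int) (end_column : Int) : String × String × String :=
  let lines := PySem.Str.splitlines text
  let start_index := (PySem.List.pyRange 0 (start_line - 1)).foldl
      (fun acc i => acc + (PySem.Str.len (PySem.List.pyGetD lines i "") + 1)) 0 + start_column - 1
  let end_index := (PySem.List.pyRange 0 (end_line - 1)).foldl
      (fun acc i => acc + (PySem.Str.len (PySem.List.pyGetD lines i "") + 1)) 0 + end_column - 1
  (PySem.Str.slice text none (some start_index),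
   PySem.Str.slice text (some start_index) (some end_index),
   PySem.Str.slice text (some end_index) none)

-- ===== PORT B =====
def slice_text_around_alt (text : String) (start_line : Int) (start_column : Int) (end_line : Int) (end_column : Int) : String × String × String :=
  let lines := PySem.Str.splitlines text
  let offsets := lines.foldl
      (fun acc ln => acc ++ [PySem.List.pyGetD acc (-1) 0 + PySem.Str.len ln + 1]) [(0 : Int)]
  let start_index := PySem.List.pyGetD offsets (max (start_line - 1) 0) 0 + start_column - 1
  let end_index := PySem.List.pyGetD offsets (max (end_line - 1) 0) 0 + end_column - 1
  (PySem.Str.slice text none (some start_index),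
   PySem.Str.slice text (some start_index) (some end_index),
   PySem.Str.slice text (some end_index) none)

-- ===== PRECONDITION & SPEC =====
-- Pre_ is exactly A's return domain: A raises IndexError (lines[i] out of range) iff
-- start_line - 1 or end_line - 1 exceeds len(text.splitlines()); no returning input is excluded.
def Pre_slice_text_around (text : String) (start_line : Int) (start_column : Int) (end_line : Int) (end_column : Int) : Prop :=
  start_line - 1 ≤ ((PySem.Str.splitlines text).length : Int) ∧
  end_line - 1 ≤ ((PySem.Str.splitlines text).length : Int)
instance (text : String) (start_line : Int) (start_column : Int) (end_line : Int) (end_column : Int) : Decidable (Pre_slice_text_around text start_line start_column end_line end_column) := by unfold Pre_slice_text_around; infer_instance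
def pvWitness_slice_text_around : String × Int × Int × Int × Int := ("ab\ncd", 1, 2, 2, 1)

def Spec_slice_text_around (text : String) (start_line : Int) (start_column : Int) (end_line : Int) (end_column : Int) (out : String × String × String) : Prop := out = slice_text_around_alt text start_line start_column end_line end_column
instance (text : String) (start_line : Int) (start_column : Int) (end_line : Int) (end_column : Int) (out : String × String × String) : Decidable (Spec_slice_text_around text start_line start_column end_line end_column out) := by unfold Spec_slice_text_around; infer_instance

-- ===== CLAIM (what is proved, stated in full; the proofs are below) =====
def Claim_equal_slice_text_around : Prop := ∀ (text : String) (start_line : Int) (start_column : Int) (end_line : Int) (end_column : Int), Dom_slice_text_around text start_line start_column end_line end_column → Pre_slice_text_around text start_line start_column end_line end_column → Spec_slice_text_around text start_line start_column end_line end_column (slice_text_around text start_line start_column end_line end_column)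

-- ===== LEMMAS AND PROOFS =====

-- the suffix of offsets produced after the initial [0], starting from running offset c
def pvOffsAux (c : Int) : List String → List Int
  | [] => []
  | l :: r => (c + PySem.Str.len l + 1) :: pvOffsAux (c + PySem.Str.len l + 1) r

-- sum of len(line)+1 over the first k lines
def pvS (ls : List String) (k : Nat) : Int := ((ls.take k).map (fun l => PySem.Str.len l + 1)).sum

theorem pvS_succ (ls : List String) (n : Nat) (hn : n < ls.length) :
    pvS ls (n+1) = pvS ls n + (PySem.Str.len ls[n] + 1) := by
  unfold pvS
  simp only [List.map_take]
  rw [List.sum_take_succ _ n (by simpa using hn)]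
  simp

theorem pv_foldl_build (ls : List String) (pre : List Int) (c : Int) :
    ls.foldl (fun acc ln => acc ++ [PySem.List.pyGetD acc (-1) 0 + PySem.Str.len ln + 1]) (pre ++ [c])
      = (pre ++ [c]) ++ pvOffsAux c ls := by
  induction ls generalizing pre c with
  | nil => simp [pvOffsAux]
  | cons l r ih =>
      simp only [List.foldl_cons, PySem.List.pyGetD_neg_one_append_singleton]
      rw [show (pre ++ [c]) ++ [c + PySem.Str.len l + 1] = (pre ++ [c]) ++ [c + PySem.Str.len l + 1] from rfl,
        ih (pre ++ [c]) (c + PySem.Str.len l + 1)]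
      simp [pvOffsAux, List.append_assoc]

theorem pv_offs_getD (n : Nat) (ls : List String) (c : Int) (h : n ≤ ls.length) :
    (c :: pvOffsAux c ls).getD n 0 = c + pvS ls n := by
  induction n generalizing ls c with
  | zero => simp [pvS]
  | succ n ih =>
      cases ls with
      | nil => simp at h
      | cons l r =>
          simp only [pvOffsAux, List.getD_cons_succ]
          rw [ih r (c + PySem.Str.len l + 1) (by simpa using h)]
          simp [pvS]
          ring

theorem pv_sum_range (ls : List String) (n : Nat) (h : n ≤ ls.length) :
    (PySem.List.pyRange 0 (n : Int)).foldl
      (fun acc i => acc + (PySem.Str.len (PySem.List.pyGetD ls i "") + 1)) 0 = pvS ls n := by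
  induction n with
  | zero => simp [PySem.List.pyRange_one_eq_nil (le_refl (0 : Int)), pvS]
  | succ n ih =>
      have hn : n < ls.length := h
      rw [show ((n + 1 : Nat) : Int) = (n : Int) + 1 by push_cast; ring,
        PySem.List.pyRange_one_succ_right (by positivity), List.foldl_append,
        ih (le_of_lt hn)]
      simp only [List.foldl_cons, List.foldl_nil, PySem.List.pyGetD_ofNat ls n "" hn]
      rw [pvS_succ ls n hn]

theorem pv_idx_eq (ls : List String) (m : Int) (hm : m ≤ (ls.length : Int)) :
    (PySem.List.pyRange 0 m).foldl
        (fun acc i => acc + (PySem.Str.len (PySem.List.pyGetD ls i "") + 1)) 0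
      = PySem.List.pyGetD
          (ls.foldl (fun acc ln => acc ++ [PySem.List.pyGetD acc (-1) 0 + PySem.Str.len ln + 1]) [(0 : Int)])
          (max m 0) 0 := by
  have hb : ls.foldl (fun acc ln => acc ++ [PySem.List.pyGetD acc (-1) 0 + PySem.Str.len ln + 1]) [(0 : Int)]
      = (0 : Int) :: pvOffsAux 0 ls := by
    have := pv_foldl_build ls [] 0
    simpa using this
  rw [hb]
  by_cases hle : m ≤ 0
  · rw [PySem.List.pyRange_one_eq_nil hle, max_eq_right hle]
    simp [PySem.List.pyGetD_zero_cons]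
  · have hpos : 0 < m := by omega
    have hmn : m = ((m.toNat : Nat) : Int) := (Int.toNat_of_nonneg (le_of_lt hpos)).symm
    have hlen : m.toNat ≤ ls.length := by omega
    rw [max_eq_left (le_of_lt hpos), hmn, pv_sum_range ls m.toNat hlen,
      PySem.List.pyGetD_natCast, pv_offs_getD m.toNat ls 0 hlen]
    ring

-- ===== VERDICT (by name: the statement is the Claim_ definition above) =====
theorem slice_text_around_spec : Claim_equal_slice_text_around := by
  intro text start_line start_column end_line end_column _ hpre
  unfold Spec_slice_text_around slice_text_around slice_text_around_alt
  obtain ⟨h1, h2⟩ := hpre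
  simp only [pv_idx_eq (PySem.Str.splitlines text) (start_line - 1) h1,
    pv_idx_eq (PySem.Str.splitlines text) (end_line - 1) h2]
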